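-- pv_equiv track=rewrite | github.com/trinhdu97/Equivalence-checking-quantum-circuit | local_projection_computation.py | is_sequential_natural_numbers
-- ===== SOURCE A (Python) =====
-- def is_sequential_natural_numbers(num_set):
--     """
--     Checks if the given set of integers represents a sequential array of natural numbers, including 0.
--
--     Arguments:
--     - num_set (set): A set of integers to check.
--
--     Returns:
--     - bool: True if the set represents a sequential array of natural numbers (including 0), False otherwise.
--     """
--     # Convert set to a sorted list
--     sorted_numbers = sorted(num_set)
--
--     # Check if the sorted list starts with a natural number (0 or greater)
--     if not sorted_numbers or sorted_numbers[0] < 0: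
--         return False  # Must start with 0 or greater
--
--     # Check if the numbers are sequential
--     for i in range(len(sorted_numbers) - 1):
--         if sorted_numbers[i] + 1 != sorted_numbers[i + 1]:
--             return False  # Found a gap between consecutive numbers
--
--     return True  # All numbers are consecutive
-- ===== SOURCE B (Python) =====
-- def is_sequential_natural_numbers(num_set):
--     if not num_set:
--         return False
--     lo = min(num_set)
--     hi = max(num_set)
--     return lo >= 0 and hi - lo + 1 == len(num_set)
-- ===== Notes on version B (the rewrite author's own statement) =====
-- stated objective: alternative
-- what changed: Replaces sort-then-scan-adjacent-pairs with a single min/max/length check (consecutive distinct integers iff min>=0 and max-min+1 == count); no sorting (measured ~1.2x, below the 1.5x bar).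
import Mathlib
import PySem

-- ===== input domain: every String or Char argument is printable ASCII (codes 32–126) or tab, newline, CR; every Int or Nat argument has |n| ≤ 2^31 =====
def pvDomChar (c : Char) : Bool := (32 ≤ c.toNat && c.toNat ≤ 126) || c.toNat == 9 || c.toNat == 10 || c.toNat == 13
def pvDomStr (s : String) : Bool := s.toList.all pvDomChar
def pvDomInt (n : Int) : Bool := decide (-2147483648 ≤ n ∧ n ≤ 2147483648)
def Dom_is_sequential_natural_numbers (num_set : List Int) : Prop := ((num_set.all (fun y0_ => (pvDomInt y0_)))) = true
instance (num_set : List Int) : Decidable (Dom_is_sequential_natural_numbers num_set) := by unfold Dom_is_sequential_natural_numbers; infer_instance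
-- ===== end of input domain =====

-- B replaces A's sort-then-adjacent-scan with a single min/max/length check (no sorting; alternative algorithm, similar measured cost).

-- ===== PORT A =====
-- the 'for i in range(len-1): if sorted[i]+1 != sorted[i+1]: return False' loop, as structural recursion over the same sorted list
def pvChk : List Int → Bool
  | a :: b :: t => if a + 1 ≠ b then false else pvChk (b :: t)
  | _ => true

def is_sequential_natural_numbers (num_set : List Int) : Bool :=
  let sorted_numbers := PySem.List.sorted num_set (fun x => x) false
  match sorted_numbers with
  | [] => false
  | x :: t => if x < 0 then false else pvChk (x :: t)

-- ===== PORT B =====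
def is_sequential_natural_numbers_alt (num_set : List Int) : Bool :=
  match num_set with
  | [] => false
  | _ :: _ =>
    match PySem.List.min? num_set (fun x => x), PySem.List.max? num_set (fun x => x) with
    | some lo, some hi => decide (0 ≤ lo) && decide (hi - lo + 1 = num_set.length)
    | _, _ => false

-- ===== PRECONDITION & SPEC =====
-- A's parameter is a Python set; Pre_ states its invariant (distinct elements), on which the
-- min/max/length characterisation of consecutiveness is valid.
def Pre_is_sequential_natural_numbers (num_set : List Int) : Prop := num_set.Nodup
instance (num_set : List Int) : Decidable (Pre_is_sequential_natural_numbers num_set) := by unfold Pre_is_sequential_natural_numbers; infer_instance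
def pvWitness_is_sequential_natural_numbers : List Int := [2, 0, 1]

def Spec_is_sequential_natural_numbers (num_set : List Int) (out : Bool) : Prop := out = is_sequential_natural_numbers_alt num_set
instance (num_set : List Int) (out : Bool) : Decidable (Spec_is_sequential_natural_numbers num_set out) := by unfold Spec_is_sequential_natural_numbers; infer_instance

-- ===== CLAIM (what is proved, stated in full; the proofs are below) =====
def Claim_equal_is_sequential_natural_numbers : Prop := ∀ (num_set : List Int), Dom_is_sequential_natural_numbers num_set → Pre_is_sequential_natural_numbers num_set → Spec_is_sequential_natural_numbers num_set (is_sequential_natural_numbers num_set)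

-- ===== LEMMAS AND PROOFS =====

-- in a strictly increasing list, the last element is at least head + length of tail
lemma pv_last_ge (x : Int) (t : List Int) (h : (x :: t).Pairwise (· < ·)) :
    x + t.length ≤ (x :: t).getLast (by simp) := by
  induction t generalizing x with
  | nil => simp
  | cons b t' ih =>
    have hxb : x < b := (List.pairwise_cons.mp h).1 b (by simp)
    have h' : (b :: t').Pairwise (· < ·) := (List.pairwise_cons.mp h).2
    have := ih b h'
    rw [List.getLast_cons (by simp)]
    simp only [List.length_cons] at *
    omega

-- in a ≤-sorted list every element is ≤ the last
lemma pv_le_last (x : Int) (t : List Int) (h : (x :: t).Pairwise (· ≤ ·)) :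
    ∀ y ∈ x :: t, y ≤ (x :: t).getLast (by simp) := by
  induction t generalizing x with
  | nil => simp
  | cons b t' ih =>
    have hxb : x ≤ b := (List.pairwise_cons.mp h).1 b (by simp)
    have h' : (b :: t').Pairwise (· ≤ ·) := (List.pairwise_cons.mp h).2
    intro y hy
    rw [List.getLast_cons (by simp)]
    rcases List.mem_cons.mp hy with rfl | hy'
    · exact le_trans hxb (ih b h' b (by simp))
    · exact ih b h' y hy'

-- the adjacent-pairs check on a strictly increasing list holds iff last = head + length of tail
lemma pv_chk_iff (x : Int) (t : List Int) (h : (x :: t).Pairwise (· < ·)) :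
    pvChk (x :: t) = true ↔ (x :: t).getLast (by simp) = x + t.length := by
  induction t generalizing x with
  | nil => simp [pvChk]
  | cons b t' ih =>
    have hxb : x < b := (List.pairwise_cons.mp h).1 b (by simp)
    have h' : (b :: t').Pairwise (· < ·) := (List.pairwise_cons.mp h).2
    have hlast := pv_last_ge b t' h'
    rw [List.getLast_cons (by simp)]
    by_cases hab : x + 1 = b
    · subst hab
      simp only [pvChk, if_neg (by omega : ¬ (x + 1 ≠ x + 1))]
      rw [ih (x+1) h']
      constructor <;> intro he <;> (simp only [List.length_cons] at *; omega)
    · simp only [pvChk, if_pos hab]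
      constructor
      · intro hf; exact absurd hf (by simp)
      · intro he; simp only [List.length_cons] at *; omega

-- ===== VERDICT (by name: the statement is the Claim_ definition above) =====
theorem is_sequential_natural_numbers_spec : Claim_equal_is_sequential_natural_numbers := by
  intro l _ hnd
  unfold Spec_is_sequential_natural_numbers
  unfold is_sequential_natural_numbers is_sequential_natural_numbers_alt
  have hperm : (PySem.List.sorted l (fun x => x) false).Perm l := PySem.List.sorted_perm l _ _
  have hpw : (PySem.List.sorted l (fun x => x) false).Pairwise (fun a b => (fun x => x) a ≤ (fun x => x) b) :=
    PySem.List.sorted_pairwise l _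
  have hnds : (PySem.List.sorted l (fun x => x) false).Nodup := hperm.nodup_iff.mpr hnd
  cases hs : PySem.List.sorted l (fun x => x) false with
  | nil =>
    have hl : l = [] := (PySem.List.sorted_eq_nil_iff l _ _).mp hs
    subst hl; rfl
  | cons x t =>
    rw [hs] at hperm hpw hnds
    have hlt : (x :: t).Pairwise (· < ·) := by
      have := List.Pairwise.and hpw hnds
      exact this.imp (fun h => lt_of_le_of_ne h.1 h.2)
    -- l is nonempty
    cases l with
    | nil => exact absurd hperm.length_eq (by simp)
    | cons c r =>
      -- min? and max? are some
      cases hmin : PySem.List.min? (c :: r) (fun x => x) with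
      | none => exact absurd hmin (by simp [PySem.List.min?_eq_none_iff])
      | some lo =>
        cases hmax : PySem.List.max? (c :: r) (fun x => x) with
        | none => exact absurd hmax (by simp [PySem.List.max?_eq_none_iff])
        | some hi =>
          simp only []
          -- lo = x (head of sorted)
          have hlo_mem : lo ∈ c :: r := PySem.List.min?_mem hmin
          have hlo_min : ∀ y ∈ c :: r, lo ≤ y := fun y hy => PySem.List.min?_isMin hmin y hy
          have hx_min : ∀ y ∈ c :: r, x ≤ y := PySem.List.key_head_sorted_le (c :: r) (fun x => x) hs
          have hx_mem : x ∈ c :: r := hperm.mem_iff.mp (by simp)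
          have hlox : lo = x := le_antisymm (hlo_min x hx_mem) (hx_min lo hlo_mem)
          -- hi = last of sorted
          have hhi_mem : hi ∈ c :: r := PySem.List.max?_mem hmax
          have hhi_max : ∀ y ∈ c :: r, y ≤ hi := fun y hy => PySem.List.max?_isMax hmax y hy
          have hlast_mem : (x :: t).getLast (by simp) ∈ c :: r :=
            hperm.mem_iff.mp (List.getLast_mem _)
          have hlast_max : ∀ y ∈ x :: t, y ≤ (x :: t).getLast (by simp) := pv_le_last x t hpw
          have hhil : hi = (x :: t).getLast (by simp) :=
            le_antisymm (hlast_max hi (hperm.mem_iff.mpr hhi_mem)) (hhi_max _ hlast_mem)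
          have hlen : (c :: r).length = t.length + 1 := by
            have := hperm.length_eq; simpa using this.symm
          by_cases hneg : x < 0
          · rw [if_pos hneg]
            have : ¬ (0 ≤ lo) := by omega
            simp [this]
          · rw [if_neg hneg]
            have hiff := pv_chk_iff x t hlt
            rcases Bool.eq_false_or_eq_true (pvChk (x :: t)) with hc | hc
            · rw [hc]
              have heq : (x :: t).getLast (by simp) = x + ↑t.length := hiff.mp hc
              have h1 : (0 ≤ lo) := by omega
              have h2 : hi - lo + 1 = ((c :: r).length : Int) := by
                rw [hlox, hhil, hlen, heq]; push_cast; omega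
              simp [h1, h2]
            · rw [hc]
              have hne : (x :: t).getLast (by simp) ≠ x + ↑t.length := by
                rw [hc] at hiff; simpa using hiff
              simp only [Bool.false_eq, Bool.and_eq_false_iff, decide_eq_false_iff_not]
              simp
              right
              rw [hlox, hhil]
              have hrt : (r.length : Int) = (t.length : Int) := by
                simp only [List.length_cons] at hlen
                have : r.length = t.length := by omega
                exact_mod_cast this
              rw [hrt]
              omega
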